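-- pv_equiv track=rewrite | github.com/Rhodium-Complex/s-reach | S-REACH/system/views.py | aroma_searchable
-- ===== SOURCE A (Python) =====
-- def aroma_searchable(fragments):
--     if len(fragments)==1:
--         yield fragments[0]
--     else:
--         tmp = fragments.copy()
--         tmp[-2] = tmp[-2]+"="+tmp[-1]
--         tmp.pop()
--         yield from aroma_searchable(tmp)
--
--         tmp = fragments.copy()
--         tmp[-2] = tmp[-2]+":"+tmp[-1]
--         tmp.pop()
--         yield from aroma_searchable(tmp)
-- ===== SOURCE B (Python) =====
-- import itertools
--
-- def aroma_searchable(fragments):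
--     first = fragments[0]
--     for seps in itertools.product("=:", repeat=len(fragments) - 1):
--         result = first
--         for i, s in enumerate(reversed(seps)):
--             result += s + fragments[i + 1]
--         yield result
-- ===== Notes on version B (the rewrite author's own statement) =====
-- stated objective: idiomatic
-- what changed: A recursively splits on the last gap, copying the whole list at each of 2^(n-1) recursion nodes; B is a flat loop over itertools.product('=:', repeat=n-1) that builds each combination directly from the original fragments, with no list copying or recursion.
import Mathlib
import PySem

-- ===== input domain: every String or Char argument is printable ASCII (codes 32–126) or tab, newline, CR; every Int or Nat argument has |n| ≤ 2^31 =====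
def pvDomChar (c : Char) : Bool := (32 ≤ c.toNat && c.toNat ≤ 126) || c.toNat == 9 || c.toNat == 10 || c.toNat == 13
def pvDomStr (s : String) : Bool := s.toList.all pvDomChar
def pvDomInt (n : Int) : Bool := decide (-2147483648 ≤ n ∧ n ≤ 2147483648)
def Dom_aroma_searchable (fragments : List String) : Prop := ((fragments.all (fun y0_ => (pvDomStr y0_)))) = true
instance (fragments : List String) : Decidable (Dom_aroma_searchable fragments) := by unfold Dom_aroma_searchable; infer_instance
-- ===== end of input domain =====

-- B replaces A's copy-heavy last-gap recursion by a flat itertools.product loop (idiomatic); both raise IndexError on [], excluded by Pre_.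

-- ===== PORT A =====
-- tmp = fragments.copy(); tmp[-2] = tmp[-2]+sep+tmp[-1]; tmp.pop()
def pyMergeLast (fragments : List String) (sep : String) : List String :=
  fragments.dropLast.dropLast ++
    [((PySem.List.pyGet? fragments (-2)).getD "") ++ sep ++ ((PySem.List.pyGet? fragments (-1)).getD "")]

theorem pyMergeLast_length (fragments : List String) (sep : String) :
    (pyMergeLast fragments sep).length = fragments.length - 2 + 1 := by
  simp [pyMergeLast]; omega

def aroma_searchable (fragments : List String) : List String :=
  if fragments.length = 1 then
    [(PySem.List.pyGet? fragments 0).getD ""]       -- yield fragments[0]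
  else if fragments.length = 0 then []              -- Python raises IndexError here (tmp[-2]); excluded by Pre_
  else
    aroma_searchable (pyMergeLast fragments "=") ++ aroma_searchable (pyMergeLast fragments ":")
termination_by fragments.length
decreasing_by
  all_goals rw [pyMergeLast_length]; omega

-- ===== PORT B =====
-- itertools.product("=:", repeat = n) as a list of separator tuples (leftmost varies slowest)
def pyProductRepeat (choices : List String) : Nat → List (List String)
  | 0 => [[]]
  | n + 1 => choices.flatMap (fun c => (pyProductRepeat choices n).map (fun t => c :: t))

-- result = first; for i, s in enumerate(reversed(seps)): result += s + fragments[i+1]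
-- (zip with rest = fragments[1:] is exact: len(seps) = len(rest) for every produced tuple)
def buildCombo (first : String) (rest : List String) (seps : List String) : String :=
  (seps.reverse.zip rest).foldl (fun acc p => acc ++ p.1 ++ p.2) first

def aroma_searchable_alt (fragments : List String) : List String :=
  match fragments with
  | [] => []                                        -- Python raises IndexError (fragments[0]); excluded by Pre_
  | first :: rest =>
    (pyProductRepeat ["=", ":"] rest.length).map (fun seps => buildCombo first rest seps)

-- ===== PRECONDITION & SPEC =====
-- Pre_ excludes only the empty list, on which both Pythons raise IndexError.
def Pre_aroma_searchable (fragments : List String) : Prop := fragments ≠ []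
instance (fragments : List String) : Decidable (Pre_aroma_searchable fragments) := by
  unfold Pre_aroma_searchable; infer_instance
def pvWitness_aroma_searchable : List String := ["a", "b", "c"]

def Spec_aroma_searchable (fragments : List String) (out : List String) : Prop := out = aroma_searchable_alt fragments
instance (fragments : List String) (out : List String) : Decidable (Spec_aroma_searchable fragments out) := by unfold Spec_aroma_searchable; infer_instance

-- ===== CLAIM (what is proved, stated in full; the proofs are below) =====
def Claim_equal_aroma_searchable : Prop := ∀ (fragments : List String), Dom_aroma_searchable fragments → Pre_aroma_searchable fragments → Spec_aroma_searchable fragments (aroma_searchable fragments)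

-- ===== LEMMAS AND PROOFS =====

theorem length_of_mem_pyProductRepeat (choices : List String) (n : Nat) :
    ∀ t ∈ pyProductRepeat choices n, t.length = n := by
  induction n with
  | zero => intro t ht; simp [pyProductRepeat] at ht; simp [ht]
  | succ n ih =>
    intro t ht
    simp [pyProductRepeat] at ht
    obtain ⟨c, -, t', ht', rfl⟩ := ht
    simp [ih t' ht']

theorem buildCombo_snoc (first : String) (zs : List String) (a d : String) (t : List String)
    (h : t.length = zs.length) :
    buildCombo first (zs ++ [a]) (d :: t) = buildCombo first zs t ++ d ++ a := by
  unfold buildCombo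
  rw [List.reverse_cons, List.zip_append (by simp [h]), List.foldl_append]
  simp

theorem pyMergeLast_snoc (pre : List String) (a b sep : String) :
    pyMergeLast (pre ++ [a, b]) sep = pre ++ [a ++ sep ++ b] := by
  unfold pyMergeLast
  have h2 : PySem.List.pyGet? (pre ++ [a, b]) (-2) = some a := by
    rw [PySem.List.pyGet?_neg_ofNat _ 2 (by omega) (by simp)]
    simp
  have h1 : PySem.List.pyGet? (pre ++ [a, b]) (-1) = some b := by
    rw [PySem.List.pyGet?_neg_one]
    have e : pre ++ [a, b] = (pre ++ [a]) ++ [b] := by simp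
    rw [e, List.getLast?_concat]
  rw [h1, h2]
  have e : pre ++ [a, b] = (pre ++ [a]) ++ [b] := by simp
  rw [e, List.dropLast_concat, List.dropLast_concat]
  simp

theorem pyMergeLast_cons_snoc (first : String) (zs : List String) (a b sep : String) :
    pyMergeLast (first :: (zs ++ [a, b])) sep = first :: (zs ++ [a ++ sep ++ b]) := by
  simpa using pyMergeLast_snoc (first :: zs) a b sep

theorem pyMergeLast_pair (x y sep : String) :
    pyMergeLast [x, y] sep = [x ++ sep ++ y] := by
  simpa using pyMergeLast_snoc [] x y sep

theorem aroma_single (x : String) : aroma_searchable [x] = [x] := by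
  rw [aroma_searchable]; simp

theorem aroma_main : ∀ (n : Nat) (first : String) (rest : List String), rest.length = n →
    aroma_searchable (first :: rest) =
      (pyProductRepeat ["=", ":"] rest.length).map (fun seps => buildCombo first rest seps) := by
  intro n
  induction n using Nat.strong_induction_on with
  | _ n ih =>
    intro first rest hlen
    induction rest using List.reverseRecOn with
    | nil =>
      rw [aroma_single]
      simp [pyProductRepeat, buildCombo]
    | append_singleton ys b _ =>
      induction ys using List.reverseRecOn with
      | nil =>
        -- fragments = [first, b]
        rw [aroma_searchable]
        simp only [List.nil_append]
        rw [if_neg (by simp), if_neg (by simp)]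
        rw [pyMergeLast_pair, pyMergeLast_pair, aroma_single, aroma_single]
        simp [pyProductRepeat, buildCombo]
      | append_singleton zs a _ =>
        -- rest = zs ++ [a, b]
        have hr : (zs ++ [a]) ++ [b] = zs ++ [a, b] := by simp
        rw [hr] at hlen ⊢
        have hn : n = zs.length + 2 := by simpa using hlen.symm
        rw [aroma_searchable]
        rw [if_neg (by simp), if_neg (by simp)]
        rw [pyMergeLast_cons_snoc, pyMergeLast_cons_snoc]
        have ihlen : zs.length + 1 < n := by omega
        rw [ih _ ihlen first (zs ++ [a ++ "=" ++ b]) (by simp),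
            ih _ ihlen first (zs ++ [a ++ ":" ++ b]) (by simp)]
        -- now compute the RHS product of length zs.length + 2
        have hL : (zs ++ [a, b] : List String).length = zs.length + 2 := by simp
        rw [hL]
        show _ = (pyProductRepeat ["=", ":"] (zs.length + 1 + 1)).map _
        rw [pyProductRepeat]
        rw [List.map_flatMap]
        have key : ∀ (c : String), ((pyProductRepeat ["=", ":"] (zs.length + 1)).map (fun t => c :: t)).map
              (fun seps => buildCombo first (zs ++ [a, b]) seps)
            = (pyProductRepeat ["=", ":"] ((zs ++ [a ++ c ++ b] : List String).length)).map
              (fun seps => buildCombo first (zs ++ [a ++ c ++ b]) seps) := by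
          intro c
          rw [List.map_map]
          have hL' : (zs ++ [a ++ c ++ b] : List String).length = zs.length + 1 := by simp
          rw [hL']
          apply List.map_congr_left
          intro t ht
          have htl : t.length = zs.length + 1 := length_of_mem_pyProductRepeat _ _ t ht
          obtain ⟨d, t', rfl⟩ : ∃ d t', t = d :: t' := by
            cases t with
            | nil => simp at htl
            | cons d t' => exact ⟨d, t', rfl⟩
          have ht'l : t'.length = zs.length := by simpa using htl
          simp only [Function.comp]
          rw [show (zs ++ [a, b] : List String) = (zs ++ [a]) ++ [b] from by simp]
          rw [buildCombo_snoc first (zs ++ [a]) b c (d :: t') (by simp [ht'l])]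
          rw [buildCombo_snoc first zs a d t' ht'l]
          rw [buildCombo_snoc first zs (a ++ c ++ b) d t' ht'l]
          simp [String.append_assoc]
        simp only [List.flatMap_cons, List.flatMap_nil, List.append_nil]
        rw [key "=", key ":"]

-- ===== VERDICT (by name: the statement is the Claim_ definition above) =====
theorem aroma_searchable_spec : Claim_equal_aroma_searchable := by
  intro fragments _ hpre
  unfold Spec_aroma_searchable
  cases fragments with
  | nil => exact absurd rfl hpre
  | cons first rest =>
    rw [aroma_main rest.length first rest rfl]
    rfl
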